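-- pv_equiv track=rewrite | github.com/pypi-data/pypi-mirror-361 | packages/painface-lc/painface_lc-0.1.4-py3-none-any.whl/painfacelib/common/utils.py | classIndexToScore
-- ===== SOURCE A (Python) =====
-- def classIndexToScore(cidx):  ## returns (classname, score)
--     if cidx==0: return 'body' , None
--     if cidx==1: return 'face' , None
--     cls=[2,5,8,11]
--     clsnames=['orbital','nose','ears','whiskers',"cheek"]
--     for c in cls:
--         cn=clsnames.pop(0)
--         for s in [0,1,2]:
--             if cidx==c+s:
--                 return cn, s
-- ===== SOURCE B (Python) =====
-- _TABLE = {
--     0: ('body', None), 1: ('face', None),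
--     2: ('orbital', 0), 3: ('orbital', 1), 4: ('orbital', 2),
--     5: ('nose', 0), 6: ('nose', 1), 7: ('nose', 2),
--     8: ('ears', 0), 9: ('ears', 1), 10: ('ears', 2),
--     11: ('whiskers', 0), 12: ('whiskers', 1), 13: ('whiskers', 2),
-- }
--
-- def classIndexToScore(cidx):
--     return _TABLE.get(cidx)
-- ===== Notes on version B (the rewrite author's own statement) =====
-- stated objective: idiomatic
-- what changed: Replaces the nested loop with pop/offset decoding by a single precomputed literal dict from index to (classname, score) and one dict lookup.
import Mathlib
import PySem

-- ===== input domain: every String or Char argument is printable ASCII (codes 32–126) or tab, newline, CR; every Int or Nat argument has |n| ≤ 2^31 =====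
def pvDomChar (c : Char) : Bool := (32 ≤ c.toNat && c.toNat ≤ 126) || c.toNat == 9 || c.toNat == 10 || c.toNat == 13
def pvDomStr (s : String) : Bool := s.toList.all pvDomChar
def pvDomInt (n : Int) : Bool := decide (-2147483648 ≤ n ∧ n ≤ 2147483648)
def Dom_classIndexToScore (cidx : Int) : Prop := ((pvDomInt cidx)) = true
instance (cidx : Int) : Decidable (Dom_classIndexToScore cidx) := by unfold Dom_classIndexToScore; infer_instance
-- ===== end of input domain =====

-- B replaces A's nested loop + pop decoding by one literal lookup table; objective: idiomatic.

-- ===== PORT A =====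
-- inner 'for s in [0,1,2]: if cidx==c+s: return cn, s'
def pvInnerA (cidx c : Int) (cn : String) : List Int → Option (String × Option Int)
  | [] => none
  | s :: rest => if cidx = c + s then some (cn, some s) else pvInnerA cidx c cn rest

-- outer 'for c in cls: cn=clsnames.pop(0); …' (pop(0) = take head, keep tail)
def pvOuterA (cidx : Int) : List Int → List String → Option (String × Option Int)
  | [], _ => none
  | c :: cs, names =>
    let cn := names.headD ""
    match pvInnerA cidx c cn [0, 1, 2] with
    | some r => some r
    | none => pvOuterA cidx cs names.tail

def classIndexToScore (cidx : Int) : Option (String × Option Int) :=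
  if cidx = 0 then some ("body", none)
  else if cidx = 1 then some ("face", none)
  else pvOuterA cidx [2, 5, 8, 11] ["orbital", "nose", "ears", "whiskers", "cheek"]

-- ===== PORT B =====
def pvTable : PySem.Dict Int (String × Option Int) :=
  PySem.Dict.ofList
    [ (0, ("body", none)), (1, ("face", none))
    , (2, ("orbital", some 0)), (3, ("orbital", some 1)), (4, ("orbital", some 2))
    , (5, ("nose", some 0)), (6, ("nose", some 1)), (7, ("nose", some 2))
    , (8, ("ears", some 0)), (9, ("ears", some 1)), (10, ("ears", some 2))
    , (11, ("whiskers", some 0)), (12, ("whiskers", some 1)), (13, ("whiskers", some 2)) ]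

def classIndexToScore_alt (cidx : Int) : Option (String × Option Int) :=
  pvTable.get? cidx

-- ===== PRECONDITION & SPEC =====
def Spec_classIndexToScore (cidx : Int) (out : Option (String × Option Int)) : Prop := out = classIndexToScore_alt cidx
instance (cidx : Int) (out : Option (String × Option Int)) : Decidable (Spec_classIndexToScore cidx out) := by unfold Spec_classIndexToScore; infer_instance

-- ===== CLAIM (what is proved, stated in full; the proofs are below) =====
def Claim_equal_classIndexToScore : Prop := ∀ (cidx : Int), Dom_classIndexToScore cidx → Spec_classIndexToScore cidx (classIndexToScore cidx)

-- ===== LEMMAS AND PROOFS =====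

-- ===== VERDICT (by name: the statement is the Claim_ definition above) =====
set_option maxHeartbeats 2000000 in
theorem classIndexToScore_spec : Claim_equal_classIndexToScore := by
  intro c _
  unfold Spec_classIndexToScore classIndexToScore classIndexToScore_alt
  have htab : pvTable = PySem.Dict.mk
      [ (0, ("body", none)), (1, ("face", none))
      , (2, ("orbital", some 0)), (3, ("orbital", some 1)), (4, ("orbital", some 2))
      , (5, ("nose", some 0)), (6, ("nose", some 1)), (7, ("nose", some 2))
      , (8, ("ears", some 0)), (9, ("ears", some 1)), (10, ("ears", some 2))
      , (11, ("whiskers", some 0)), (12, ("whiskers", some 1)), (13, ("whiskers", some 2)) ] := by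
    rfl
  rw [htab]
  simp only [pvOuterA, pvInnerA, PySem.Dict.get?, List.headD, List.tail]
  split_ifs <;> simp_all [List.find?, show ∀ a b : Int, (a == b) = decide (a = b) from fun a b => rfl, Ne.symm]
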